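-- pv_equiv track=rewrite | github.com/ribo0715/algorithm_solution | BOJ/15684. 사다리 조작_1_개선.py | get_next_list
-- ===== SOURCE A (Python) =====
-- def get_next_list(cur_list, N, H):
--     able_list = []
--     for x in range(1, H + 1):
--         for y in range(1, N + 1):
--             if [x, y] in cur_list:
--                 continue
--             elif [x, y - 1] in cur_list:
--                 continue
--             elif [x, y + 1] in cur_list:
--                 continue
--             else: # 추가 가능한 지점들을 담음
--                 able_list.append([x, y])
--
--     return able_list
-- ===== SOURCE B (Python) =====
-- def get_next_list(cur_list, N, H):
--     # Row-wise interval sweep: per row x, sort that row's rung columns, then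
--     # emit maximal runs of free columns between blocked intervals [y0-1, y0+1].
--     able_list = []
--     for x in range(1, H + 1):
--         ys = sorted(r[1] for r in cur_list if len(r) == 2 and r[0] == x)
--         start = 1
--         for y0 in ys:
--             for y in range(start, min(y0 - 1, N + 1)):
--                 able_list.append([x, y])
--             if y0 + 2 > start:
--                 start = y0 + 2
--         for y in range(start, N + 1):
--             able_list.append([x, y])
--     return able_list
-- ===== Notes on version B (the rewrite author's own statement) =====
-- stated objective: alternative
-- what changed: A tests every grid cell with three membership scans of cur_list; B instead sorts each row's rung columns once and sweeps them, emitting whole runs of free columns between the blocked intervals [y0-1, y0+1], so no per-cell membership test remains.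
import Mathlib
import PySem

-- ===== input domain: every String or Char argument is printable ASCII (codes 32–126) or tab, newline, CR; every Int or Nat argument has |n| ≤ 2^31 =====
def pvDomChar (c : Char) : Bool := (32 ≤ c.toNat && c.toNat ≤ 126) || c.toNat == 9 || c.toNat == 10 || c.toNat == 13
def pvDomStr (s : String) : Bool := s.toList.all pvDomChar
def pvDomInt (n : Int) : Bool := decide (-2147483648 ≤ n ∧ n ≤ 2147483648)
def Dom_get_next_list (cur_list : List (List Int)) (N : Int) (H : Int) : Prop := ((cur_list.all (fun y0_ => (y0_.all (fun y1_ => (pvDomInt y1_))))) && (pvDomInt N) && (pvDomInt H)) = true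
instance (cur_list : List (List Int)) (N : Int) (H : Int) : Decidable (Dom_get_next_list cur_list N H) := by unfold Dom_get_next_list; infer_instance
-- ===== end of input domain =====

-- B replaces A's per-cell triple membership scan with a row-wise interval sweep: per row it sorts
-- that row's rung columns and emits the runs of free columns between the blocked intervals
-- (alternative algorithm; same return value).

-- ===== PORT A =====
def get_next_list (cur_list : List (List Int)) (N : Int) (H : Int) : List (List Int) :=
  (PySem.List.pyRange 1 (H + 1) 1).foldl (fun able_list x =>
    (PySem.List.pyRange 1 (N + 1) 1).foldl (fun able_list y =>
      if [x, y] ∈ cur_list then able_list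
      else if [x, y - 1] ∈ cur_list then able_list
      else if [x, y + 1] ∈ cur_list then able_list
      else able_list ++ [[x, y]]) able_list) []

-- ===== PORT B =====
-- 'for y in range(a, b): able_list.append([x, y])'
def pvEmit (x a b : Int) (acc : List (List Int)) : List (List Int) :=
  (PySem.List.pyRange a b 1).foldl (fun acc y => acc ++ [[x, y]]) acc

-- the 'for y0 in ys:' loop (state = (able_list, start)) followed by the trailing emit
def pvSweep (x N : Int) (ys : List Int) (acc : List (List Int)) (s : Int) : List (List Int) :=
  match ys with
  | [] => pvEmit x s (N + 1) acc
  | y0 :: t =>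
      pvSweep x N t (pvEmit x s (min (y0 - 1) (N + 1)) acc)
        (if y0 + 2 > s then y0 + 2 else s)

-- ys = sorted(r[1] for r in cur_list if len(r) == 2 and r[0] == x)
def pvRowYs (cur_list : List (List Int)) (x : Int) : List Int :=
  PySem.List.sorted
    (cur_list.filterMap (fun r => match r with
      | [x0, y0] => if x0 = x then some y0 else none
      | _ => none))
    (fun y => y) false

def get_next_list_alt (cur_list : List (List Int)) (N : Int) (H : Int) : List (List Int) :=
  (PySem.List.pyRange 1 (H + 1) 1).foldl (fun able_list x =>
    pvSweep x N (pvRowYs cur_list x) able_list 1) []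

-- ===== PRECONDITION & SPEC =====
def Spec_get_next_list (cur_list : List (List Int)) (N : Int) (H : Int) (out : List (List Int)) : Prop := out = get_next_list_alt cur_list N H
instance (cur_list : List (List Int)) (N : Int) (H : Int) (out : List (List Int)) : Decidable (Spec_get_next_list cur_list N H out) := by unfold Spec_get_next_list; infer_instance

-- ===== CLAIM (what is proved, stated in full; the proofs are below) =====
def Claim_equal_get_next_list : Prop := ∀ (cur_list : List (List Int)) (N : Int) (H : Int), Dom_get_next_list cur_list N H → Spec_get_next_list cur_list N H (get_next_list cur_list N H)

-- ===== LEMMAS AND PROOFS =====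

-- y is within distance 1 of some element of ys
def pvBlk (ys : List Int) (y : Int) : Bool :=
  ys.any (fun y0 => decide (y0 - 1 <= y) && decide (y <= y0 + 1))

lemma pvEmit_eq (x a b : Int) (acc : List (List Int)) :
    pvEmit x a b acc = acc ++ (PySem.List.pyRange a b 1).map (fun y => [x, y]) := by
  simpa [pvEmit] using
    PySem.List.foldl_append_singleton_eq_map (fun y => [x, y]) (PySem.List.pyRange a b 1) acc

-- core of the sweep step: once the columns blocked by the smallest rung y0 are passed
-- (a >= y0 - 1), filtering out (y0 :: t)'s blocks starting at a is filtering out t's blocks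
-- starting at max a (y0 + 2)
lemma pvFilter_step (y0 : Int) (t : List Int) (N a : Int) (ha : y0 - 1 <= a) :
    (PySem.List.pyRange a (N + 1) 1).filter (fun y => !pvBlk (y0 :: t) y)
      = (PySem.List.pyRange (max a (y0 + 2)) (N + 1) 1).filter (fun y => !pvBlk t y) := by
  by_cases hN : a <= N + 1
  · have h1 : a <= min (max a (y0 + 2)) (N + 1) := by omega
    have h2 : min (max a (y0 + 2)) (N + 1) <= N + 1 := by omega
    rw [PySem.List.pyRange_one_append a (min (max a (y0 + 2)) (N + 1)) (N + 1) h1 h2,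
      List.filter_append]
    have hfirst : (PySem.List.pyRange a (min (max a (y0 + 2)) (N + 1)) 1).filter
        (fun y => !pvBlk (y0 :: t) y) = [] := by
      rw [List.filter_eq_nil_iff]
      intro y hy
      rw [PySem.List.mem_pyRange_one] at hy
      simp only [pvBlk, List.any_cons, Bool.not_eq_true', Bool.or_eq_false_iff,
        Bool.and_eq_false_iff, decide_eq_false_iff_not, not_le]
      intro h; rcases h with ⟨h, -⟩
      rcases h with h | h <;> omega
    rw [hfirst, List.nil_append]
    by_cases hle : max a (y0 + 2) <= N + 1
    · have hu : min (max a (y0 + 2)) (N + 1) = max a (y0 + 2) := by omega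
      rw [hu]
      apply List.filter_congr
      intro y hy
      rw [PySem.List.mem_pyRange_one] at hy
      simp only [pvBlk, List.any_cons]
      have hfalse : (decide (y0 - 1 <= y) && decide (y <= y0 + 1)) = false := by
        simp only [Bool.and_eq_false_iff, decide_eq_false_iff_not, not_le]; omega
      rw [hfalse]; simp
    · have hu : min (max a (y0 + 2)) (N + 1) = N + 1 := by omega
      rw [hu, PySem.List.pyRange_one_eq_nil (le_refl (N + 1)),
        PySem.List.pyRange_one_eq_nil (by omega : (N + 1 : Int) <= max a (y0 + 2))]
      simp
  · rw [PySem.List.pyRange_one_eq_nil (by omega : (N + 1 : Int) <= a),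
      PySem.List.pyRange_one_eq_nil (by omega : (N + 1 : Int) <= max a (y0 + 2))]
    simp

-- the sweep over a sorted ys produces exactly the unblocked columns of range(s, N+1)
lemma pvSweep_eq (x N : Int) (ys : List Int) (hs : ys.Pairwise (· <= ·)) :
    ∀ (s : Int) (acc : List (List Int)),
    pvSweep x N ys acc s
      = acc ++ ((PySem.List.pyRange s (N + 1) 1).filter (fun y => !pvBlk ys y)).map
          (fun y => [x, y]) := by
  induction ys with
  | nil =>
    intro s acc
    simp [pvSweep, pvEmit_eq, pvBlk]
  | cons y0 t ih =>
    intro s acc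
    rcases List.pairwise_cons.mp hs with ⟨hmin, ht⟩
    have hs' : (if y0 + 2 > s then y0 + 2 else s) = max s (y0 + 2) := by
      split_ifs <;> omega
    rw [pvSweep, hs', ih ht, pvEmit_eq, List.append_assoc, ← List.map_append]
    congr 2
    by_cases hsm : s < min (y0 - 1) (N + 1)
    · -- emit a nonempty free run [s, min (y0-1) (N+1)), then the core step
      have h1 : s <= min (y0 - 1) (N + 1) := le_of_lt hsm
      have h2 : min (y0 - 1) (N + 1) <= N + 1 := by omega
      rw [PySem.List.pyRange_one_append s (min (y0 - 1) (N + 1)) (N + 1) h1 h2,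
        List.filter_append]
      have hkeep : (PySem.List.pyRange s (min (y0 - 1) (N + 1)) 1).filter
          (fun y => !pvBlk (y0 :: t) y) = PySem.List.pyRange s (min (y0 - 1) (N + 1)) 1 := by
        rw [List.filter_eq_self]
        intro y hy
        rw [PySem.List.mem_pyRange_one] at hy
        simp only [pvBlk, List.any_cons, Bool.not_eq_true', Bool.or_eq_false_iff,
          Bool.and_eq_false_iff, decide_eq_false_iff_not, not_le, List.any_eq_false]
        constructor
        · left; omega
        · intro y' hy'
          have hge := hmin y' hy'
          intro hcon
          rw [Bool.and_eq_true, decide_eq_true_eq, decide_eq_true_eq] at hcon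
          omega
      rw [hkeep]
      congr 1
      by_cases hm : y0 - 1 <= N + 1
      · have hmm : min (y0 - 1) (N + 1) = y0 - 1 := by omega
        rw [hmm, pvFilter_step y0 t N (y0 - 1) (le_refl _)]
        have e1 : max (y0 - 1) (y0 + 2) = y0 + 2 := by omega
        have e2 : max s (y0 + 2) = y0 + 2 := by omega
        rw [e1, e2]
      · have hmm : min (y0 - 1) (N + 1) = N + 1 := by omega
        rw [hmm, PySem.List.pyRange_one_eq_nil (le_refl (N + 1)),
          PySem.List.pyRange_one_eq_nil (by omega : (N + 1 : Int) <= max s (y0 + 2))]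
        simp
    · -- no free run before y0's block: the core step applies from s itself
      by_cases hN : s < N + 1
      · have ha : y0 - 1 <= s := by omega
        rw [pvFilter_step y0 t N s ha,
          PySem.List.pyRange_one_eq_nil (by omega : min (y0 - 1) (N + 1) <= s)]
        simp
      · rw [PySem.List.pyRange_one_eq_nil (by omega : (N + 1 : Int) <= s),
          PySem.List.pyRange_one_eq_nil (by omega : min (y0 - 1) (N + 1) <= s),
          PySem.List.pyRange_one_eq_nil (by omega : (N + 1 : Int) <= max s (y0 + 2))]
        simp

-- membership in the (sorted) column list of row x is exactly membership of the rung in cur_list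
lemma mem_pvRowYs (cur_list : List (List Int)) (x y : Int) :
    y ∈ pvRowYs cur_list x ↔ [x, y] ∈ cur_list := by
  rw [pvRowYs, PySem.List.mem_sorted, List.mem_filterMap]
  constructor
  · rintro ⟨r, hr, hsome⟩
    rcases r with _ | ⟨a, _ | ⟨b, _ | ⟨c, t'⟩⟩⟩ <;> simp only at hsome
    · exact absurd hsome (by simp)
    · exact absurd hsome (by simp)
    · by_cases hx : a = x
      · subst hx
        simp at hsome
        subst hsome
        exact hr
      · rw [if_neg hx] at hsome
        exact absurd hsome (by simp)
    · exact absurd hsome (by simp)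
  · intro h
    exact ⟨[x, y], h, by simp⟩

-- A's three-way membership test is the block test against row x's column list
lemma pvBlk_rowYs (cur_list : List (List Int)) (x y : Int) :
    pvBlk (pvRowYs cur_list x) y = true
      ↔ ([x, y] ∈ cur_list ∨ [x, y - 1] ∈ cur_list ∨ [x, y + 1] ∈ cur_list) := by
  simp only [pvBlk, List.any_eq_true, Bool.and_eq_true, decide_eq_true_eq]
  constructor
  · rintro ⟨y0, hy0, hlo, hhi⟩
    rw [mem_pvRowYs] at hy0
    rcases (by omega : y0 = y - 1 ∨ y0 = y ∨ y0 = y + 1) with h | h | h <;> subst h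
    · exact Or.inr (Or.inl hy0)
    · exact Or.inl hy0
    · exact Or.inr (Or.inr hy0)
  · rintro (h | h | h)
    · exact ⟨y, (mem_pvRowYs cur_list x y).mpr h, by omega, by omega⟩
    · exact ⟨y - 1, (mem_pvRowYs cur_list x (y - 1)).mpr h, by omega, by omega⟩
    · exact ⟨y + 1, (mem_pvRowYs cur_list x (y + 1)).mpr h, by omega, by omega⟩

-- A's if-elif-elif-else chain is the single test against a boolean equivalent to the disjunction
lemma pvIfChain_eq (P1 P2 P3 : Prop) [Decidable P1] [Decidable P2] [Decidable P3]
    (a e : List (List Int)) (b : Bool) (hb : b = true ↔ (P1 ∨ P2 ∨ P3)) :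
    (if P1 then a else if P2 then a else if P3 then a else a ++ e)
      = (if (!b) = true then a ++ e else a) := by
  split_ifs with h1 h2 h3 <;> simp_all

-- A's row loop, normalized to a filter over the column range
lemma rowA_eq (cur_list : List (List Int)) (N x : Int) (acc : List (List Int)) :
    (PySem.List.pyRange 1 (N + 1) 1).foldl (fun able_list y =>
      if [x, y] ∈ cur_list then able_list
      else if [x, y - 1] ∈ cur_list then able_list
      else if [x, y + 1] ∈ cur_list then able_list
      else able_list ++ [[x, y]]) acc
    = acc ++ ((PySem.List.pyRange 1 (N + 1) 1).filter
        (fun y => !pvBlk (pvRowYs cur_list x) y)).map (fun y => [x, y]) := by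
  rw [← PySem.List.foldl_append_if (fun y => !pvBlk (pvRowYs cur_list x) y)
    (fun y => [x, y]) (PySem.List.pyRange 1 (N + 1) 1) acc]
  apply PySem.List.foldl_congr_mem
  intro a y _
  exact pvIfChain_eq _ _ _ a [[x, y]] _ (pvBlk_rowYs cur_list x y)

lemma pvRowYs_pairwise (cur_list : List (List Int)) (x : Int) :
    (pvRowYs cur_list x).Pairwise (· <= ·) := by
  have h := PySem.List.sorted_pairwise (κ := Int)
    (cur_list.filterMap (fun r => match r with
      | [x0, y0] => if x0 = x then some y0 else none
      | _ => none)) (fun y => y)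
  simpa [pvRowYs] using h

-- ===== VERDICT (by name: the statement is the Claim_ definition above) =====
theorem get_next_list_spec : Claim_equal_get_next_list := by
  intro cur_list N H _
  unfold Spec_get_next_list get_next_list get_next_list_alt
  apply PySem.List.foldl_congr_mem
  intro acc x _
  rw [rowA_eq, pvSweep_eq x N (pvRowYs cur_list x) (pvRowYs_pairwise cur_list x) 1 acc]
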